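/-
  "WHAT DID NOT CHANGE", BY TACTIC, over the flat user machine (the lemmas are X86/Derived/User/Frame.lean's).

      u_eqon        proves `Mem.EqOn lo hi μ μ'` for `μ'` = any nest of `writeLE` / `write` / `load` over `μ`, possibly through
                    callee results (`h : Mem.SameExcept ws ν ν'` in the context): one disjointness side condition per layer
      u_frame h     proves `P μ'` from `h : P μ` for the abstractions that have a transport lemma: `CodeAt`, `readLE` / `read` /
                    `readBytes` equations (also under `UInt64.ofNat`). EXTENSIBLE: a program adds its own abstraction `A` with
                        macro_rules | `(tactic| u_frame_rule $h) => `(tactic| (refine A.frame $h ?eqon))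
      u_read        proves `μ'.readLE a k = x` for `μ'` a nest of stores: the layer that wrote `[a, a+k)` gives the value, the
                    others are skipped
      u_same        proves `Mem.SameExcept ws μ μ'` for `μ'` a nest of stores / callee results over `μ`: every store lies inside
                    one of the windows `ws` (the footprint of a contract); a callee's result is a hypothesis `Mem.SameExcept ws' ν ν'`
                    whose windows are numbers over known terms (after `simp only [X86.User.Spec.footprint, vspec, w_rsp_<addr>] at w_same`)
                    and lie inside `ws` (`Mem.SameExcept.step_same'`)
      u_kept        proves `RegsKept S v cur` for `cur` a nest of setters over a state `w` with `RegsKept S' v w` in the context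
      u_saved       proves `RegsKept T u v` from the walker's `w_kept : RegsKept S u v` and its facts `w_r : v.reg r = u.reg r`
                    for the registers of `S` outside `T` (callee-saved registers pushed and popped back)
      u_memnorm     `(nest of setters).mem` as the memory term; a walker's `w_mem : v.mem = M` is used when present

  A state's memory is first rewritten by the hypothesis `w_mem : v.mem = M` of `u_walk` (UserX/Walk.lean).
  Ported from the older proof layer (proofs.v3/X86V3/FrameTac.lean, CallFrame.lean).
-/
import UserX.Open
import UserX.WalkLemmas

namespace X86
namespace User

theorem CodeAt.frame {μ ν : Mem} {base : Word} {bs : List Byte} (h : CodeAt μ base bs)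
    (he : Mem.EqOn base.toNat (base.toNat + bs.length) μ ν) (h3 : base.toNat + bs.length < 2 ^ 64) : CodeAt ν base bs :=
  CodeAt.of_eqOn he h (Nat.le_refl _) (Nat.le_refl _) h3

theorem Mem.readLE_frame {μ ν : Mem} {a : Word} {k x : Nat} (h : μ.readLE a k = x)
    (he : Mem.EqOn a.toNat (a.toNat + k) μ ν) (h3 : a.toNat + k < 2 ^ 64) : ν.readLE a k = x :=
  (he.readLE a k (Nat.le_refl _) (Nat.le_refl _) h3).trans h

theorem Mem.ofNat_readLE_frame {μ ν : Mem} {a : Word} {k : Nat} {x : Word} (h : UInt64.ofNat (μ.readLE a k) = x)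
    (he : Mem.EqOn a.toNat (a.toNat + k) μ ν) (h3 : a.toNat + k < 2 ^ 64) : UInt64.ofNat (ν.readLE a k) = x := by
  rw [he.readLE a k (Nat.le_refl _) (Nat.le_refl _) h3]
  exact h

theorem Mem.read_frame {μ ν : Mem} {a : Word} {x : Byte} (h : μ.read a = x) (he : Mem.EqOn a.toNat (a.toNat + 1) μ ν) :
    ν.read a = x :=
  (he a (Nat.le_refl _) (Nat.lt_succ_self _)).trans h

theorem Mem.readBytes_frame {μ ν : Mem} {a : Word} {k : Nat} {x : List Byte} (h : μ.readBytes a k = x)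
    (he : Mem.EqOn a.toNat (a.toNat + k) μ ν) (h3 : a.toNat + k < 2 ^ 64) : ν.readBytes a k = x :=
  (he.readBytes a k (Nat.le_refl _) (Nat.le_refl _) h3).trans h

/-- `[a, a + k)` lies inside one of the windows. On a literal list it unfolds to a disjunction of linear facts. -/
def InSpans (ws : List Span) (a k : Nat) : Prop := ∃ w ∈ ws, w.lo ≤ a ∧ a + k ≤ w.hi

theorem inSpans_nil (a k : Nat) : InSpans [] a k ↔ False := by
  simp [InSpans]

theorem inSpans_cons (w : Span) (ws : List Span) (a k : Nat) :
    InSpans (w :: ws) a k ↔ (w.lo ≤ a ∧ a + k ≤ w.hi) ∨ InSpans ws a k := by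
  simp [InSpans]

/-- One more store inside the windows. -/
theorem Mem.SameExcept.step_writeLE' {ws : List Span} {μ ν : Mem} (a : Word) (k x : Nat) (h : Mem.SameExcept ws μ ν)
    (hk : a.toNat + k < 2 ^ 64) (hin : InSpans ws a.toNat k) : Mem.SameExcept ws μ (ν.writeLE a k x) :=
  h.step_writeLE a k x hk hin

/-- **Through a callee's footprint**: every window of the callee is empty or lies inside one of ours. -/
theorem Mem.SameExcept.step_same' {ws ws' : List Span} {μ ν ξ : Mem} (h : Mem.SameExcept ws μ ν) (hs : Mem.SameExcept ws' ν ξ)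
    (hsub : ∀ w ∈ ws', w.hi ≤ w.lo ∨ InSpans ws w.lo (w.hi - w.lo)) : Mem.SameExcept ws μ ξ := by
  apply h.step_same hs
  intro w hw a h1 h2
  rcases hsub w hw with he | ⟨w', hw', k1, k2⟩
  · omega
  · exact ⟨w', hw', by omega, by omega⟩

/-- The frame for a list `T` from the frame for `S` and the registers of `S` outside `T` being what they were. -/
theorem RegsKept.of_restored {S T : List Reg} {u v : State} (hk : RegsKept S u v)
    (h : ∀ r, r.isIn S = true → r.isIn T = false → v.reg r = u.reg r) : RegsKept T u v := by
  intro r hr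
  cases hs : r.isIn S with
  | false => exact hk r hs
  | true => exact h r hs hr

end User
end X86

open Lean Meta Elab Tactic in
/-- `(nest of setters).mem` as the memory term; then the memory of a state VARIABLE by what the context says of it (the
walker's `w_mem : v.mem = M`). -/
elab "u_memnorm" : tactic => do
  evalTactic (← `(tactic| try simp (implicitDefEqProofs := false) only [X86.User.State.mem_setReg,
    X86.User.State.mem_setRip, X86.User.State.mem_setFlags, X86.User.State.mem_setMem, X86.User.State.mem_setMxcsr]))
  withMainContext do
    for d in ← getLCtx do
      if d.isImplementationDetail then continue
      let ty := (← instantiateMVars d.type).cleanupAnnotations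
      unless ty.isAppOfArity ``Eq 3 do continue
      let lhs := (ty.getArg! 1).consumeMData
      let isMemOfVar := lhs.isAppOfArity ``X86.User.State.mem 1 && lhs.appArg!.consumeMData.isFVar
      if isMemOfVar && ty.getArg! 2 != lhs then
        let h ← Term.exprToSyntax d.toExpr
        evalTactic (← `(tactic| try rw [$h:term]))

open Lean Elab Tactic in
/-- `decide`, but only on a goal WITHOUT free variables (on a symbolic proposition `decide` would try to evaluate the
instance: whnf for minutes). -/
elab "u_decide_closed" : tactic => withMainContext do
  let t ← instantiateMVars (← (← getMainGoal).getType)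
  if t.hasFVar || t.hasMVar then
    throwError "u_decide_closed: the goal is not closed"
  if (t.find? fun e => e.isAppOf ``List.length || e.isAppOf ``List.take || e.isAppOf ``List.drop).isSome then
    throwError "u_decide_closed: list computations are left to u_omega"
  evalTactic (← `(tactic| decide))

/-- A side condition of the frame tactics. -/
macro "u_frame_side" : tactic => `(tactic| first
  | u_decide_closed
  | u_omega
  | fail "u_frame: a disjointness / range side condition could not be proved from the context")

syntax "u_eqon" : tactic
macro_rules
  | `(tactic| u_eqon) => `(tactic| first
    | (with_reducible exact X86.User.Mem.EqOn.refl _ _ _)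
    | (with_reducible assumption)
    -- the side conditions are ANONYMOUS holes: a named hole would be re-used by the recursive call
    | ((with_reducible refine X86.User.Mem.EqOn.step_writeLE _ _ _ ?_ ?_ ?_)
       rotate_left
       · u_frame_side
       · u_frame_side
       u_eqon)
    | ((with_reducible refine X86.User.Mem.EqOn.step_write _ _ ?_ ?_)
       rotate_left
       · u_frame_side
       u_eqon)
    | ((with_reducible refine X86.User.Mem.EqOn.step_load _ _ ?_ ?_ ?_)
       rotate_left
       · u_frame_side
       · u_frame_side
       u_eqon)
    | ((with_reducible refine X86.User.Mem.EqOn.step_same ?_ (by with_reducible assumption) ?_)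
       rotate_left
       -- (the windows one by one: `∀ w ∈ [w₁, w₂], P w` is `P w₁ ∧ P w₂`. Not `rcases … with rfl | rfl`: inside a macro the
       -- identifier `rfl` carries macro scopes, `rcases` takes it for a name and nothing is substituted)
       · (simp only [List.forall_mem_cons, List.not_mem_nil, false_imp_iff, implies_true, and_true]
          (repeat' apply And.intro) <;> u_frame_side)
       u_eqon)
    | fail "u_eqon: the memory is not a nest of stores / callee results over the memory of the hypothesis")

/-- The shape phase of `u_frame`: pick the transport rule (goals `eqon`, `side`). Extend with `macro_rules`. -/
syntax "u_frame_rule " term:max : tactic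
macro_rules
  | `(tactic| u_frame_rule $h) => `(tactic| first
    | (with_reducible refine X86.User.CodeAt.frame $h ?eqon ?side)
    | (with_reducible refine X86.User.Mem.readLE_frame $h ?eqon ?side)
    | (with_reducible refine X86.User.Mem.ofNat_readLE_frame $h ?eqon ?side)
    | (with_reducible refine X86.User.Mem.read_frame $h ?eqon)
    | (with_reducible refine X86.User.Mem.readBytes_frame $h ?eqon ?side)
    | fail "u_frame: no transport rule applies to this goal (add one: macro_rules | `(tactic| u_frame_rule $h) => …)")

syntax "u_frame " term:max : tactic
macro_rules
  | `(tactic| u_frame $h) => `(tactic| first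
    | (with_reducible exact $h)
    | (u_memnorm
       u_frame_rule $h
       all_goals (first | (case eqon => u_eqon) | u_frame_side)))

/-- `μ'.readLE a k = x` for `μ'` a nest of stores over a memory about which the context has the fact: at a layer that writes
exactly `[a, a+k)` the value written is read back; a layer elsewhere is skipped; at the bottom: the hypothesis. -/
syntax "u_read_core" : tactic
macro_rules
  | `(tactic| u_read_core) => `(tactic| first
    | (with_reducible assumption)
    | ((with_reducible rw [X86.User.Mem.readLE_writeLE_same _ _ _ _ (by decide)]) <;>
       first | (with_reducible rfl) | u_decide_closed | u_omega | (simp only [Nat.reducePow]; u_omega))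
    | ((with_reducible rw [X86.User.Mem.readLE_writeLE_disjoint_noWrap _ _ _ _ _ _ ?_ ?_ ?_])
       rotate_left
       · u_frame_side
       · u_frame_side
       · u_frame_side
       u_read_core)
    | fail "u_read: cannot resolve this read through the stores")

macro "u_read" : tactic => `(tactic| (u_memnorm; u_read_core))

/-- A side condition of `u_same`: "this store lies inside one of the windows" / "the callee's windows lie inside ours". -/
macro "u_same_side" : tactic => `(tactic| first
  | (simp only [X86.User.inSpans_cons, X86.User.inSpans_nil, or_false]; u_omega)
  | u_omega
  | fail "u_same: a store outside the windows of the footprint (or a callee's window that is not inside ours)")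

/-- `Mem.SameExcept ws μ μ'` for `μ'` a nest of stores / callee results (`SameExcept` hypotheses of the context) over `μ`:
every store must lie inside one of the windows `ws` (the contract's footprint). -/
syntax "u_same_core" : tactic
macro_rules
  | `(tactic| u_same_core) => `(tactic| first
    | (with_reducible exact X86.User.Mem.SameExcept.refl _ _)
    | (with_reducible assumption)
    | ((with_reducible refine X86.User.Mem.SameExcept.step_writeLE' _ _ _ ?_ ?_ ?_)
       rotate_left
       · u_frame_side
       · u_same_side
       u_same_core)
    -- through a callee's result (`w_same : Mem.SameExcept ws' s_entry.mem s_ret.mem`, its footprint unfolded): its windows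
    -- lie inside ours; what is left is about the memory at the callee's entry, again a nest of stores (`w_mem_<addr>`)
    | ((with_reducible refine X86.User.Mem.SameExcept.step_same' ?_ (by with_reducible assumption) ?_)
       rotate_left
       · (simp only [List.forall_mem_cons, List.not_mem_nil, false_imp_iff, implies_true, and_true]
          (repeat' apply And.intro) <;>
            (simp only [X86.User.inSpans_cons, X86.User.inSpans_nil, or_false]; u_omega))
       (u_memnorm; u_same_core))
    | fail "u_same: the memory is not a nest of stores / callee results over the memory of the footprint")

macro "u_same" : tactic => `(tactic| (u_memnorm; u_same_core))

/-- `∀ r, r.isIn S = true → r.isIn S' = true` for literal register lists `S ⊆ S'`. -/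
macro "u_regs_sub" : tactic => `(tactic| exact X86.Reg.isIn_mono (by rfl))

/-- `RegsKept S v cur` for a nest of setters over a state about which a `RegsKept` fact (or nothing: `refl`) is in the
context. Syntactic (`with_reducible`), setters first. -/
macro "u_kept" : tactic => `(tactic| (
  repeat (first
    | (with_reducible apply X86.User.RegsKept.setRip)
    | (with_reducible apply X86.User.RegsKept.setFlags)
    | (with_reducible apply X86.User.RegsKept.setMem)
    | (with_reducible apply X86.User.RegsKept.setMxcsr)
    | (with_reducible refine X86.User.RegsKept.setReg ?_ _ _ ?isin
       case isin => decide)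
    | (with_reducible refine X86.User.RegsKept.setReg_restore ?_ _ _ ?eq
       case eq => first | (with_reducible rfl) | (with_reducible assumption) | (simp [*]; done))
    | (with_reducible exact X86.User.RegsKept.refl _ _)
    | (with_reducible assumption)
    | (with_reducible refine X86.User.RegsKept.mono (by with_reducible assumption) (by u_regs_sub)))))

/-- `RegsKept T u v` at the end of a walk: from `w_kept : RegsKept S u v` (any name) and, for each register of `S` outside
`T`, a hypothesis `v.reg r = u.reg r` of the context (the walker's `w_rbx` … after the register was popped back). -/
macro "u_saved" : tactic => `(tactic| (
  refine X86.User.RegsKept.of_restored (by with_reducible assumption) ?_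
  intro r h1 h2
  cases r <;> first
    | (exact absurd h1 (by decide))
    | (exact absurd h2 (by decide))
    | (with_reducible assumption)))
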